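-- pv_equiv track=rewrite | github.com/docxology/MetaInformAnt | src/metainformant/protein/uniprot.py | parse_uniprot_fasta_header
-- ===== SOURCE A (Python) =====
-- from typing import Any, Dict, List, Optional
--
-- def parse_uniprot_fasta_header(header: str) -> Dict[str, str]:
--     """Parse UniProt FASTA header to extract metadata.
--
--     Args:
--         header: FASTA header line (without >)
--
--     Returns:
--         Dictionary with parsed header information
--
--     Example:
--         >>> header = "sp|P12345|PROT_HUMAN Protein name OS=Homo sapiens"
--         >>> parsed = parse_uniprot_fasta_header(header)
--         >>> parsed['accession'] == 'P12345'
--         True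
--     """
--     # UniProt FASTA header format: db|accession|entry_name description OS=organism
--     parsed = {
--         'database': '',
--         'accession': '',
--         'entry_name': '',
--         'description': '',
--         'organism': '',
--         'gene_name': ''
--     }
--
--     if not header:
--         return parsed
--
--     # Split by spaces, but handle OS= and GN= specially
--     parts = header.split()
--
--     if len(parts) >= 1:
--         # First part: db|accession|entry_name
--         id_part = parts[0]
--         id_components = id_part.split('|')
--         if len(id_components) >= 3:
--             parsed['database'] = id_components[0]
--             parsed['accession'] = id_components[1]
--             parsed['entry_name'] = id_components[2]
--
--     # Extract description and organism
--     description_parts = []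
--     i = 1
--     while i < len(parts):
--         part = parts[i]
--         if part.startswith('OS='):
--             # Organism
--             organism_parts = []
--             while i < len(parts) and not parts[i].startswith('GN=') and not parts[i].startswith('PE='):
--                 organism_parts.append(parts[i])
--                 i += 1
--             parsed['organism'] = ' '.join(organism_parts).replace('OS=', '')
--         elif part.startswith('GN='):
--             # Gene name
--             parsed['gene_name'] = part.replace('GN=', '')
--             i += 1
--         else:
--             description_parts.append(part)
--             i += 1
--
--     parsed['description'] = ' '.join(description_parts)
--
--     return parsed
-- ===== SOURCE B (Python) =====
-- def parse_uniprot_fasta_header(header: str) -> dict: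
--     """Single-pass state-machine parse of a UniProt FASTA header."""
--     parts = header.split()
--     database = accession = entry_name = ''
--     if parts:
--         ids = parts[0].split('|')
--         if len(ids) >= 3:
--             database, accession, entry_name = ids[0], ids[1], ids[2]
--     organism_parts = []
--     description_parts = []
--     gene_name = ''
--     in_organism = False
--     for tok in parts[1:]:
--         if tok.startswith('OS='):
--             if not in_organism:
--                 organism_parts = [tok]
--                 in_organism = True
--             else:
--                 organism_parts.append(tok)
--         elif tok.startswith('GN='):
--             in_organism = False
--             gene_name = tok.replace('GN=', '')
--         elif tok.startswith('PE='):
--             in_organism = False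
--             description_parts.append(tok)
--         else:
--             (organism_parts if in_organism else description_parts).append(tok)
--     return {
--         'database': database,
--         'accession': accession,
--         'entry_name': entry_name,
--         'description': ' '.join(description_parts),
--         'organism': ' '.join(organism_parts).replace('OS=', ''),
--         'gene_name': gene_name,
--     }
-- ===== Notes on version B (the rewrite author's own statement) =====
-- stated objective: simpler
-- what changed: A's manual index loop with a nested inner while that gobbles organism tokens is replaced by a single flat for-loop over the tokens carrying an in_organism boolean state flag.
import Mathlib
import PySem

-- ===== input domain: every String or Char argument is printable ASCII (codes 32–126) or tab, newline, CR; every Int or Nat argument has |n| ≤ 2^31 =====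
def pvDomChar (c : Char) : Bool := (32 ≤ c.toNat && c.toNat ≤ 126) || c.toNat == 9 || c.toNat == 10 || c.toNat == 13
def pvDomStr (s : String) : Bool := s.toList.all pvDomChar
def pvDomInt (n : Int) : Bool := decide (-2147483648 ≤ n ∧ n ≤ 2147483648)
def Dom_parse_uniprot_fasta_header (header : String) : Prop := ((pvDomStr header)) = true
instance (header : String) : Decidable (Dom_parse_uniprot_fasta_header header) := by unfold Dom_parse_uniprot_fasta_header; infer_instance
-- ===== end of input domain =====

-- B replaces A's index-driven outer loop with its nested inner while by a single left-to-right
-- pass carrying an in_organism flag (objective: simpler, same linear cost).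

-- ===== PORT A =====

-- A's inner while: collect tokens until one starts with 'GN=' or 'PE='; returns (taken, remaining)
def pvCollectA (rest : List String) : List String × List String :=
  match rest with
  | [] => ([], [])
  | t :: ts =>
    if PySem.Str.startswith t "GN=" || PySem.Str.startswith t "PE=" then ([], t :: ts)
    else
      let r := pvCollectA ts
      (t :: r.1, r.2)

-- facts cited by pvLoopA's decreasing_by (must precede the port)
lemma pvCollectA_snd_le (l : List String) : (pvCollectA l).2.length ≤ l.length := by
  induction l with
  | nil => simp [pvCollectA]
  | cons t ts ih =>
    simp only [pvCollectA]
    split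
    · simp
    · simpa using Nat.le_succ_of_le ih

lemma pv_os_excl (p : String) (h : PySem.Str.startswith p "OS=" = true) :
    PySem.Str.startswith p "GN=" = false ∧ PySem.Str.startswith p "PE=" = false := by
  simp only [PySem.Str.startswith_eq] at *
  rw [PySem.Chars.startswith_iff] at h
  obtain ⟨t, ht⟩ := h
  constructor <;>
  · rw [← Bool.not_eq_true, PySem.Chars.startswith_iff]
    rintro ⟨u, hu⟩
    rw [← ht] at hu
    simp at hu

lemma pvCollectA_cons_of_not (t : String) (ts : List String)
    (h1 : PySem.Str.startswith t "GN=" = false)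
    (h2 : PySem.Str.startswith t "PE=" = false) :
    pvCollectA (t :: ts) = (t :: (pvCollectA ts).1, (pvCollectA ts).2) := by
  simp only [PySem.Str.startswith_eq] at h1 h2
  simp at h1 h2
  simp [pvCollectA, h1, h2]

-- A's outer while over i = 1 .. len(parts); state (organism, gene_name, description_parts)
def pvLoopA (rest : List String) (org gene : String) (desc : List String) :
    String × String × List String :=
  match rest with
  | [] => (org, gene, desc)
  | p :: rs =>
    if h : PySem.Str.startswith p "OS=" then
      let c := pvCollectA (p :: rs)
      pvLoopA c.2 (PySem.Str.replace (PySem.Str.join " " c.1) "OS=" "") gene desc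
    else if PySem.Str.startswith p "GN=" then
      pvLoopA rs org (PySem.Str.replace p "GN=" "") desc
    else
      pvLoopA rs org gene (desc ++ [p])
  termination_by rest.length
  decreasing_by
  · obtain ⟨h1, h2⟩ := pv_os_excl p h
    rw [pvCollectA_cons_of_not p rs h1 h2]
    exact Nat.lt_succ_of_le (pvCollectA_snd_le rs)
  · simp
  · simp

-- parts[0].split('|') handling: kept only when it has ≥ 3 components (shared id format)
def pvIdTriple (parts : List String) : String × String × String :=
  match parts with
  | [] => ("", "", "")
  | id_part :: _ =>
    match (PySem.Str.split? id_part "|").getD [] with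
    | db :: acc :: en :: _ => (db, acc, en)
    | _ => ("", "", "")

def parse_uniprot_fasta_header (header : String) : List (String × String) :=
  if header = "" then
    [("database", ""), ("accession", ""), ("entry_name", ""),
     ("description", ""), ("organism", ""), ("gene_name", "")]
  else
    let parts := PySem.Str.split₀ header
    let ids := pvIdTriple parts
    let r := pvLoopA (parts.drop 1) "" "" []
    [("database", ids.1), ("accession", ids.2.1), ("entry_name", ids.2.2),
     ("description", PySem.Str.join " " r.2.2), ("organism", r.1), ("gene_name", r.2.1)]

-- ===== PORT B =====

-- B's single-pass step; state (in_organism, organism_parts, gene_name, description_parts)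
def pvStepB (st : Bool × List String × String × List String) (tok : String) :
    Bool × List String × String × List String :=
  if PySem.Str.startswith tok "OS=" then
    if st.1 then (true, st.2.1 ++ [tok], st.2.2.1, st.2.2.2)
    else (true, [tok], st.2.2.1, st.2.2.2)
  else if PySem.Str.startswith tok "GN=" then
    (false, st.2.1, PySem.Str.replace tok "GN=" "", st.2.2.2)
  else if PySem.Str.startswith tok "PE=" then
    (false, st.2.1, st.2.2.1, st.2.2.2 ++ [tok])
  else if st.1 then (true, st.2.1 ++ [tok], st.2.2.1, st.2.2.2)
  else (false, st.2.1, st.2.2.1, st.2.2.2 ++ [tok])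

def parse_uniprot_fasta_header_alt (header : String) : List (String × String) :=
  let parts := PySem.Str.split₀ header
  let ids := pvIdTriple parts
  let st := (parts.drop 1).foldl pvStepB (false, [], "", [])
  [("database", ids.1), ("accession", ids.2.1), ("entry_name", ids.2.2),
   ("description", PySem.Str.join " " st.2.2.2),
   ("organism", PySem.Str.replace (PySem.Str.join " " st.2.1) "OS=" ""),
   ("gene_name", st.2.2.1)]

-- ===== PRECONDITION & SPEC =====
def Spec_parse_uniprot_fasta_header (header : String) (out : List (String × String)) : Prop := out = parse_uniprot_fasta_header_alt header
instance (header : String) (out : List (String × String)) : Decidable (Spec_parse_uniprot_fasta_header header out) := by unfold Spec_parse_uniprot_fasta_header; infer_instance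

-- ===== CLAIM (what is proved, stated in full; the proofs are below) =====
def Claim_equal_parse_uniprot_fasta_header : Prop := ∀ (header : String), Dom_parse_uniprot_fasta_header header → Spec_parse_uniprot_fasta_header header (parse_uniprot_fasta_header header)

-- ===== LEMMAS AND PROOFS =====

-- equation lemmas for pvLoopA
lemma pvLoopA_nil (org g : String) (d : List String) : pvLoopA [] org g d = (org, g, d) := by
  rw [pvLoopA]

lemma pvLoopA_cons_OS (p : String) (rs : List String) (org g : String) (d : List String)
    (h : PySem.Str.startswith p "OS=" = true) :
    pvLoopA (p :: rs) org g d
      = pvLoopA (pvCollectA rs).2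
          (PySem.Str.replace (PySem.Str.join " " (p :: (pvCollectA rs).1)) "OS=" "") g d := by
  obtain ⟨h1, h2⟩ := pv_os_excl p h
  rw [pvLoopA]
  rw [dif_pos h]
  rw [pvCollectA_cons_of_not p rs h1 h2]

lemma pvLoopA_cons_GN (p : String) (rs : List String) (org g : String) (d : List String)
    (h0 : PySem.Str.startswith p "OS=" = false) (h : PySem.Str.startswith p "GN=" = true) :
    pvLoopA (p :: rs) org g d = pvLoopA rs org (PySem.Str.replace p "GN=" "") d := by
  rw [pvLoopA, dif_neg (by rw [h0]; decide), if_pos h]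

lemma pvLoopA_cons_other (p : String) (rs : List String) (org g : String) (d : List String)
    (h0 : PySem.Str.startswith p "OS=" = false) (h : PySem.Str.startswith p "GN=" = false) :
    pvLoopA (p :: rs) org g d = pvLoopA rs org g (d ++ [p]) := by
  rw [pvLoopA, dif_neg (by rw [h0]; decide), if_neg (by rw [h]; decide)]

-- step lemmas for pvStepB
lemma pvStepB_OS_true (st : Bool × List String × String × List String) (tok : String)
    (h : PySem.Str.startswith tok "OS=" = true) (hf : st.1 = true) :
    pvStepB st tok = (true, st.2.1 ++ [tok], st.2.2.1, st.2.2.2) := by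
  simp [pvStepB, hf]
  simp only [PySem.Str.startswith_eq] at h
  simp at h
  simp [h]

lemma pvStepB_OS_false (st : Bool × List String × String × List String) (tok : String)
    (h : PySem.Str.startswith tok "OS=" = true) (hf : st.1 = false) :
    pvStepB st tok = (true, [tok], st.2.2.1, st.2.2.2) := by
  simp only [PySem.Str.startswith_eq] at h
  simp at h
  simp [pvStepB, h, hf]

lemma pvStepB_GN (st : Bool × List String × String × List String) (tok : String)
    (h0 : PySem.Str.startswith tok "OS=" = false) (h : PySem.Str.startswith tok "GN=" = true) :
    pvStepB st tok = (false, st.2.1, PySem.Str.replace tok "GN=" "", st.2.2.2) := by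
  simp only [PySem.Str.startswith_eq] at h0 h
  simp at h0 h
  simp [pvStepB, h0, h]

lemma pvStepB_PE (st : Bool × List String × String × List String) (tok : String)
    (h0 : PySem.Str.startswith tok "OS=" = false) (h1 : PySem.Str.startswith tok "GN=" = false)
    (h : PySem.Str.startswith tok "PE=" = true) :
    pvStepB st tok = (false, st.2.1, st.2.2.1, st.2.2.2 ++ [tok]) := by
  simp only [PySem.Str.startswith_eq] at h0 h1 h
  simp at h0 h1 h
  simp [pvStepB, h0, h1, h]

lemma pvStepB_plain (st : Bool × List String × String × List String) (tok : String)
    (h0 : PySem.Str.startswith tok "OS=" = false) (h1 : PySem.Str.startswith tok "GN=" = false)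
    (h2 : PySem.Str.startswith tok "PE=" = false) :
    pvStepB st tok = if st.1 then (true, st.2.1 ++ [tok], st.2.2.1, st.2.2.2)
      else (false, st.2.1, st.2.2.1, st.2.2.2 ++ [tok]) := by
  simp only [PySem.Str.startswith_eq] at h0 h1 h2
  simp at h0 h1 h2
  simp [pvStepB, h0, h1, h2]

lemma pvCollectA_cons_of_stop (t : String) (ts : List String)
    (h : PySem.Str.startswith t "GN=" = true ∨ PySem.Str.startswith t "PE=" = true) :
    pvCollectA (t :: ts) = ([], t :: ts) := by
  simp only [PySem.Str.startswith_eq] at h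
  simp at h
  simp [pvCollectA]
  intro hc
  rcases h with h | h <;> simp [h] at hc ⊢

-- while in_organism, B's fold appends exactly the tokens A's inner while collects
lemma pv_foldl_inOrg (rest : List String) (M : List String) (g : String) (d : List String) :
    (rest.foldl pvStepB (true, M, g, d)).2
      = ((pvCollectA rest).2.foldl pvStepB (false, M ++ (pvCollectA rest).1, g, d)).2 := by
  induction rest generalizing M with
  | nil => simp [pvCollectA]
  | cons t ts ih =>
    by_cases hOS : PySem.Str.startswith t "OS=" = true
    · obtain ⟨h1, h2⟩ := pv_os_excl t hOS
      rw [pvCollectA_cons_of_not t ts h1 h2, List.foldl_cons,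
        pvStepB_OS_true (true, M, g, d) t hOS rfl]
      simpa using ih (M ++ [t])
    · have hOS' : PySem.Str.startswith t "OS=" = false := by
        exact Bool.not_eq_true _ ▸ Bool.of_not_eq_true hOS
      by_cases hGN : PySem.Str.startswith t "GN=" = true
      · rw [pvCollectA_cons_of_stop t ts (Or.inl hGN), List.foldl_cons, List.foldl_cons,
          pvStepB_GN (true, M, g, d) t hOS' hGN, pvStepB_GN (false, M ++ [], g, d) t hOS' hGN]
        simp
      · have hGN' : PySem.Str.startswith t "GN=" = false := by
          exact Bool.not_eq_true _ ▸ Bool.of_not_eq_true hGN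
        by_cases hPE : PySem.Str.startswith t "PE=" = true
        · rw [pvCollectA_cons_of_stop t ts (Or.inr hPE), List.foldl_cons, List.foldl_cons,
            pvStepB_PE (true, M, g, d) t hOS' hGN' hPE,
            pvStepB_PE (false, M ++ [], g, d) t hOS' hGN' hPE]
          simp
        · have hPE' : PySem.Str.startswith t "PE=" = false := by
            exact Bool.not_eq_true _ ▸ Bool.of_not_eq_true hPE
          rw [pvCollectA_cons_of_not t ts hGN' hPE', List.foldl_cons,
            pvStepB_plain (true, M, g, d) t hOS' hGN' hPE']
          simpa using ih (M ++ [t])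

-- A's whole loop equals B's fold followed by the final join/replace, whenever A's current
-- organism string is the finalisation of B's organism list
lemma pv_loopA_eq_foldB (n : Nat) : ∀ (rest : List String), rest.length ≤ n →
    ∀ (L : List String) (g : String) (d : List String),
    pvLoopA rest (PySem.Str.replace (PySem.Str.join " " L) "OS=" "") g d
      = (fun s2 => (PySem.Str.replace (PySem.Str.join " " s2.1) "OS=" "", s2.2.1, s2.2.2))
          ((rest.foldl pvStepB (false, L, g, d)).2) := by
  induction n with
  | zero =>
    intro rest hlen L g d
    have hr : rest = [] := List.eq_nil_of_length_eq_zero (Nat.le_zero.mp hlen)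
    subst hr
    simp [pvLoopA_nil]
  | succ n ih =>
    intro rest hlen L g d
    match rest with
    | [] => simp [pvLoopA_nil]
    | p :: rs =>
      by_cases hOS : PySem.Str.startswith p "OS=" = true
      · rw [pvLoopA_cons_OS p rs _ g d hOS, List.foldl_cons,
          pvStepB_OS_false (false, L, g, d) p hOS rfl]
        have hre := pv_foldl_inOrg rs [p] g d
        rw [hre]
        have hlen' : (pvCollectA rs).2.length ≤ n := by
          have := pvCollectA_snd_le rs
          simp at hlen; omega
        simpa using ih (pvCollectA rs).2 hlen' (p :: (pvCollectA rs).1) g d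
      · have hOS' : PySem.Str.startswith p "OS=" = false := by
          exact Bool.not_eq_true _ ▸ Bool.of_not_eq_true hOS
        by_cases hGN : PySem.Str.startswith p "GN=" = true
        · rw [pvLoopA_cons_GN p rs _ g d hOS' hGN, List.foldl_cons,
            pvStepB_GN (false, L, g, d) p hOS' hGN]
          exact ih rs (by simp at hlen; omega) L (PySem.Str.replace p "GN=" "") d
        · have hGN' : PySem.Str.startswith p "GN=" = false := by
            exact Bool.not_eq_true _ ▸ Bool.of_not_eq_true hGN
          rw [pvLoopA_cons_other p rs _ g d hOS' hGN', List.foldl_cons]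
          by_cases hPE : PySem.Str.startswith p "PE=" = true
          · rw [pvStepB_PE (false, L, g, d) p hOS' hGN' hPE]
            exact ih rs (by simp at hlen; omega) L g (d ++ [p])
          · have hPE' : PySem.Str.startswith p "PE=" = false := by
              exact Bool.not_eq_true _ ▸ Bool.of_not_eq_true hPE
            rw [pvStepB_plain (false, L, g, d) p hOS' hGN' hPE']
            simp only [if_neg (by decide : ¬ (false = true))]
            exact ih rs (by simp at hlen; omega) L g (d ++ [p])

-- ===== VERDICT (by name: the statement is the Claim_ definition above) =====
theorem parse_uniprot_fasta_header_spec : Claim_equal_parse_uniprot_fasta_header := by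
  unfold Claim_equal_parse_uniprot_fasta_header Spec_parse_uniprot_fasta_header
  intro header _
  by_cases h : header = ""
  · subst h
    decide
  · unfold parse_uniprot_fasta_header parse_uniprot_fasta_header_alt
    rw [if_neg h]
    dsimp only
    have key := pv_loopA_eq_foldB ((PySem.Str.split₀ header).drop 1).length
      ((PySem.Str.split₀ header).drop 1) le_rfl [] "" []
    have hinit : PySem.Str.replace (PySem.Str.join " " []) "OS=" "" = "" := by decide
    rw [hinit] at key
    rw [key]
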